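-- pv_equiv track=rewrite | github.com/Soy-code/Code-Up | ybm_cos_pro/basic_allday_customer.py | solution
-- ===== SOURCE A (Python) =====
-- class BasicCustomer():
--     def __init__(self, age, use_hour):
--         self.age = age
--         self.use_hour = use_hour
--
--     def get_price(self):
--         if self.age >= 18:
--             return self.use_hour * 4000
--         else:
--             return self.use_hour * 3000
--
-- class AllDayCustomer():
--     def __init__(self, age, use_hour):
--         self.age = age
--         self.use_hour = use_hour
--
--     def get_price(self):
--         if self.age >= 18:
--             return 20000
--         else:
--             return 15000
--
-- def solution(basic, allday):
--     answer = 0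
--
--     for i in range(len(basic)):
--         bc = BasicCustomer(basic[i][0], basic[i][1])
--         answer += bc.get_price()
--
--     for i in range(len(allday)):
--         ad = AllDayCustomer(allday[i][0], allday[i][1])
--         answer += ad.get_price()
--
--     return answer
-- ===== SOURCE B (Python) =====
-- def solution(basic, allday):
--     # Base-plus-surcharge decomposition: everyone is first charged the minor
--     # rate (3000/hour for basic, 15000 flat for allday); adults then get a
--     # surcharge of 1000/hour (basic) or 5000 flat (allday).
--     base = 3000 * sum(c[1] for c in basic) + 15000 * len(allday)
--     surcharge = 1000 * sum(c[1] for c in basic if c[0] >= 18) \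
--               + 5000 * sum(1 for c in allday if c[0] >= 18)
--     return base + surcharge
-- ===== Notes on version B (the rewrite author's own statement) =====
-- stated objective: alternative
-- what changed: Replaces the per-customer branch-and-add loops (with helper classes) by a base-plus-surcharge decomposition: one unconditional base charge computed from the total basic hours and the allday headcount, plus an adult surcharge (1000/hour basic, 5000 flat allday), using the identities 4000=3000+1000 and 20000=15000+5000.
import Mathlib
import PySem

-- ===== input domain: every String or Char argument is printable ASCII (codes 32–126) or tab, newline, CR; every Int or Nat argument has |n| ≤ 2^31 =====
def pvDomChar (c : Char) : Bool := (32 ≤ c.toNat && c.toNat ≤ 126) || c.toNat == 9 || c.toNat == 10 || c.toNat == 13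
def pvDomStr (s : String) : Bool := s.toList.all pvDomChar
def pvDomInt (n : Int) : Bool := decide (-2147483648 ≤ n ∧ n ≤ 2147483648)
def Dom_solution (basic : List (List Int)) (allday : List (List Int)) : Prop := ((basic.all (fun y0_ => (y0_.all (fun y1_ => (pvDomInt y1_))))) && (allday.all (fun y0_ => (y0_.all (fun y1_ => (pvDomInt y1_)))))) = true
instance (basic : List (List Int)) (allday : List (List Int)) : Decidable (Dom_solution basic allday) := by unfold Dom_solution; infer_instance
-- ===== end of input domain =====

-- B replaces the per-customer branch-and-add loops by a base-plus-surcharge decomposition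
-- (unconditional base charge from totals, plus an adult surcharge); objective: alternative.

-- ===== PORT A =====
-- Literal port of A: index loop over range(len(..)), per-customer price added to a running total.
-- pyGetD defaults are never hit inside Pre_solution (every row has length ≥ 2).
def solution (basic : List (List Int)) (allday : List (List Int)) : Int :=
  let answer : Int := 0
  let answer := (PySem.List.pyRange 0 basic.length 1).foldl (fun acc i =>
      let c := PySem.List.pyGetD basic i []
      let age := PySem.List.pyGetD c 0 0
      let useHour := PySem.List.pyGetD c 1 0
      acc + (if age ≥ 18 then useHour * 4000 else useHour * 3000)) answer
  let answer := (PySem.List.pyRange 0 allday.length 1).foldl (fun acc i =>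
      let c := PySem.List.pyGetD allday i []
      let age := PySem.List.pyGetD c 0 0
      let _useHour := PySem.List.pyGetD c 1 0
      acc + (if age ≥ 18 then (20000 : Int) else 15000)) answer
  answer

-- ===== PORT B =====
-- Port of B: unconditional base charge from totals plus adult surcharge.
def solution_alt (basic : List (List Int)) (allday : List (List Int)) : Int :=
  let base : Int := 3000 * ((basic.map (fun c => PySem.List.pyGetD c 1 0)).sum)
      + 15000 * (allday.length : Int)
  let surcharge : Int := 1000 * (((basic.filter (fun c => PySem.List.pyGetD c 0 0 ≥ 18)).map
        (fun c => PySem.List.pyGetD c 1 0)).sum)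
      + 5000 * (((allday.filter (fun c => PySem.List.pyGetD c 0 0 ≥ 18)).length : Int))
  base + surcharge

-- ===== PRECONDITION & SPEC =====
-- A indexes row[0] and row[1] of every customer and raises IndexError on a row shorter than 2.
def Pre_solution (basic : List (List Int)) (allday : List (List Int)) : Prop :=
  (∀ c ∈ basic, 2 ≤ c.length) ∧ (∀ c ∈ allday, 2 ≤ c.length)
instance (basic : List (List Int)) (allday : List (List Int)) : Decidable (Pre_solution basic allday) := by
  unfold Pre_solution; infer_instance
def pvWitness_solution : List (List Int) × List (List Int) := ([[20, 3], [10, 2]], [[19, 1], [5, 4]])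

def Spec_solution (basic : List (List Int)) (allday : List (List Int)) (out : Int) : Prop := out = solution_alt basic allday
instance (basic : List (List Int)) (allday : List (List Int)) (out : Int) : Decidable (Spec_solution basic allday out) := by unfold Spec_solution; infer_instance

-- ===== CLAIM (what is proved, stated in full; the proofs are below) =====
def Claim_equal_solution : Prop := ∀ (basic : List (List Int)) (allday : List (List Int)), Dom_solution basic allday → Pre_solution basic allday → Spec_solution basic allday (solution basic allday)

-- ===== LEMMAS AND PROOFS =====
lemma basic_fold_eq (basic : List (List Int)) (init : Int) :
    basic.foldl (fun acc c =>
        acc + (if PySem.List.pyGetD c 0 0 ≥ 18 then PySem.List.pyGetD c 1 0 * 4000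
               else PySem.List.pyGetD c 1 0 * 3000)) init
      = init
        + 3000 * ((basic.map (fun c => PySem.List.pyGetD c 1 0)).sum)
        + 1000 * (((basic.filter (fun c => PySem.List.pyGetD c 0 0 ≥ 18)).map
            (fun c => PySem.List.pyGetD c 1 0)).sum) := by
  induction basic generalizing init with
  | nil => simp
  | cons c rest ih =>
    simp only [List.foldl_cons, List.filter_cons, List.map_cons, List.sum_cons, ih]
    by_cases h : PySem.List.pyGetD c 0 0 ≥ 18
    · simp [h]; ring
    · simp [h]; ring

lemma allday_fold_eq (allday : List (List Int)) (init : Int) :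
    allday.foldl (fun acc c =>
        acc + (if PySem.List.pyGetD c 0 0 ≥ 18 then (20000 : Int) else 15000)) init
      = init
        + 15000 * (allday.length : Int)
        + 5000 * (((allday.filter (fun c => PySem.List.pyGetD c 0 0 ≥ 18)).length : Int)) := by
  induction allday generalizing init with
  | nil => simp
  | cons c rest ih =>
    simp only [List.foldl_cons, List.filter_cons, ih]
    by_cases h : PySem.List.pyGetD c 0 0 ≥ 18
    · simp [h]; ring
    · simp [h]; ring

-- ===== VERDICT (by name: the statement is the Claim_ definition above) =====
theorem solution_spec : Claim_equal_solution := by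
  intro basic allday _ _
  unfold Spec_solution solution solution_alt
  show (PySem.List.pyRange 0 allday.length 1).foldl
      (fun acc c => acc + (if PySem.List.pyGetD (PySem.List.pyGetD allday c []) 0 0 ≥ 18
          then (20000 : Int) else 15000))
      ((PySem.List.pyRange 0 basic.length 1).foldl
        (fun acc c => acc +
          (if PySem.List.pyGetD (PySem.List.pyGetD basic c []) 0 0 ≥ 18
           then PySem.List.pyGetD (PySem.List.pyGetD basic c []) 1 0 * 4000
           else PySem.List.pyGetD (PySem.List.pyGetD basic c []) 1 0 * 3000)) 0) = _
  rw [PySem.List.foldl_pyRange_zero_pyGetD' basic []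
        (fun acc c => acc + (if PySem.List.pyGetD c 0 0 ≥ 18
            then PySem.List.pyGetD c 1 0 * 4000 else PySem.List.pyGetD c 1 0 * 3000)) 0,
      PySem.List.foldl_pyRange_zero_pyGetD' allday []
        (fun acc c => acc + (if PySem.List.pyGetD c 0 0 ≥ 18 then (20000 : Int) else 15000)) _,
      basic_fold_eq, allday_fold_eq]
  ring
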